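-- pv_equiv track=rewrite | github.com/eftalgezer/PlotScan | PlotScan/points.py | remove_duplicate_rectangles
-- ===== SOURCE A (Python) =====
-- def are_rectangles_equal(rect1, rect2, pixel_tolerance=1):
--     corners1 = rect1[0]
--     corners2 = rect2[0]
--     if len(corners1) != len(corners2):
--         return False
--     for i in range(len(corners1)):
--         x1, y1 = corners1[i]
--         x2, y2 = corners2[i]
--
--         if abs(x1 - x2) > pixel_tolerance or abs(y1 - y2) > pixel_tolerance:
--             return False
--     return True
--
-- def remove_duplicate_rectangles(rectangles, pixel_tolerance=1):
--     unique_rectangles = []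
--     for rect in rectangles:
--         is_duplicate = any(
--             are_rectangles_equal(rect, unique_rect, pixel_tolerance) for unique_rect in unique_rectangles)
--
--         if not is_duplicate:
--             unique_rectangles.append(rect)
--     return unique_rectangles
-- ===== SOURCE B (Python) =====
-- def _corners_close(c1, c2, pixel_tolerance):
--     return len(c1) == len(c2) and all(
--         abs(x1 - x2) <= pixel_tolerance and abs(y1 - y2) <= pixel_tolerance
--         for (x1, y1), (x2, y2) in zip(c1, c2))
--
--
-- def remove_duplicate_rectangles(rectangles, pixel_tolerance=1):
--     # Sieve: take the first pending rectangle as unique, discard every later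
--     # pending rectangle whose corners are all within tolerance of it, repeat.
--     unique_rectangles = []
--     pending = rectangles
--     while pending:
--         first = pending[0]
--         unique_rectangles.append(first)
--         pending = [s for s in pending[1:]
--                    if not _corners_close(s[0], first[0], pixel_tolerance)]
--     return unique_rectangles
-- ===== Notes on version B (the rewrite author's own statement) =====
-- stated objective: alternative
-- what changed: Replaces A's accumulate-and-scan loop (each rectangle tested with any() against the whole list kept so far) by a sieve: take the first pending rectangle, filter out all later pending rectangles within tolerance of it, repeat on the remainder; the corner test becomes a zip/all pass instead of an index loop.
-- outside the precondition, e.g. on remove_duplicate_rectangles([[[(0, 0)]], []], 1): A raises IndexError, B raises IndexError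
import Mathlib
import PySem

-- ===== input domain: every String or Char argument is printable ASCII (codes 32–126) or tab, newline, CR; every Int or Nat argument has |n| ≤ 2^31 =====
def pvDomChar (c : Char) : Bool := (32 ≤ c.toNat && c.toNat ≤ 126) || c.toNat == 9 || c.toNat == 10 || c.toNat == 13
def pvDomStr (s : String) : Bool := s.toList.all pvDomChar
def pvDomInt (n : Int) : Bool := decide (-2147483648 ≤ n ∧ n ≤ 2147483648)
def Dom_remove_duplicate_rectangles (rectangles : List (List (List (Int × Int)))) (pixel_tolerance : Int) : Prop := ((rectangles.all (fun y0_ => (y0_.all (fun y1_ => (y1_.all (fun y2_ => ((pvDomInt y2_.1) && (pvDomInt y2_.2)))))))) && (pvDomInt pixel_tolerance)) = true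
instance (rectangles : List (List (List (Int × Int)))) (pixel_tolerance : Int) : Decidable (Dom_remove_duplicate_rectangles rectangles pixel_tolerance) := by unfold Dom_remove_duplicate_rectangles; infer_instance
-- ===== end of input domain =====

-- B replaces A's accumulate-and-scan dedup loop by a head-first sieve over the pending
-- list (objective: alternative algorithm, same asymptotic cost).

-- ===== PORT A =====
-- index loop of are_rectangles_equal: walks the two (equal-length) corner lists in step
def are_rectangles_equal_go (pixel_tolerance : Int) : List (Int × Int) → List (Int × Int) → Bool
  | [], _ => true
  | _, [] => true   -- unreachable: called only with equal-length lists
  | (x1, y1) :: t1, (x2, y2) :: t2 =>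
      if |x1 - x2| > pixel_tolerance || |y1 - y2| > pixel_tolerance then false
      else are_rectangles_equal_go pixel_tolerance t1 t2

-- rect[0]: Python raises IndexError on an empty rect; Pre_ excludes the inputs where
-- that access is reached, so headD [] is exact on Pre_.
def are_rectangles_equal (rect1 rect2 : List (List (Int × Int))) (pixel_tolerance : Int) : Bool :=
  let corners1 := rect1.headD []
  let corners2 := rect2.headD []
  if corners1.length ≠ corners2.length then false
  else are_rectangles_equal_go pixel_tolerance corners1 corners2

def remove_duplicate_rectangles_go (pixel_tolerance : Int) (unique_rectangles : List (List (List (Int × Int)))) :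
    List (List (List (Int × Int))) → List (List (List (Int × Int)))
  | [] => unique_rectangles
  | rect :: rest =>
      if unique_rectangles.any (fun u => are_rectangles_equal rect u pixel_tolerance) then
        remove_duplicate_rectangles_go pixel_tolerance unique_rectangles rest
      else
        remove_duplicate_rectangles_go pixel_tolerance (unique_rectangles ++ [rect]) rest

def remove_duplicate_rectangles (rectangles : List (List (List (Int × Int)))) (pixel_tolerance : Int) : List (List (List (Int × Int))) :=
  remove_duplicate_rectangles_go pixel_tolerance [] rectangles

-- ===== PORT B =====
def corners_close (c1 c2 : List (Int × Int)) (pixel_tolerance : Int) : Bool :=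
  c1.length == c2.length &&
    (c1.zip c2).all (fun p => |p.1.1 - p.2.1| ≤ pixel_tolerance && |p.1.2 - p.2.2| ≤ pixel_tolerance)

def remove_duplicate_rectangles_alt (rectangles : List (List (List (Int × Int)))) (pixel_tolerance : Int) : List (List (List (Int × Int))) :=
  match rectangles with
  | [] => []
  | first :: pending =>
      first :: remove_duplicate_rectangles_alt
        (pending.filter (fun s => !corners_close (s.headD []) (first.headD []) pixel_tolerance))
        pixel_tolerance
termination_by rectangles.length
decreasing_by
  simp only [List.length_cons, List.length_unattach]
  exact Nat.lt_succ_of_le (le_trans (List.length_filter_le _ _) (by simp))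

-- ===== PRECONDITION & SPEC =====
-- Pre_ excludes inputs where Python A raises IndexError (rect[0] on an empty rectangle):
-- that access is reached exactly when the list has at least two rectangles and one is empty.
def Pre_remove_duplicate_rectangles (rectangles : List (List (List (Int × Int)))) (pixel_tolerance : Int) : Prop :=
  rectangles.length ≤ 1 ∨ ∀ r ∈ rectangles, r ≠ []

instance (rectangles : List (List (List (Int × Int)))) (pixel_tolerance : Int) : Decidable (Pre_remove_duplicate_rectangles rectangles pixel_tolerance) := by unfold Pre_remove_duplicate_rectangles; infer_instance

def pvWitness_remove_duplicate_rectangles : (List (List (List (Int × Int)))) × Int :=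
  ([[[(0, 0), (3, 0)]], [[(0, 1), (3, 1)]], [[(9, 9), (12, 9)]]], 1)

def Spec_remove_duplicate_rectangles (rectangles : List (List (List (Int × Int)))) (pixel_tolerance : Int) (out : List (List (List (Int × Int)))) : Prop := out = remove_duplicate_rectangles_alt rectangles pixel_tolerance
instance (rectangles : List (List (List (Int × Int)))) (pixel_tolerance : Int) (out : List (List (List (Int × Int)))) : Decidable (Spec_remove_duplicate_rectangles rectangles pixel_tolerance out) := by unfold Spec_remove_duplicate_rectangles; infer_instance

-- ===== CLAIM (what is proved, stated in full; the proofs are below) =====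
def Claim_equal_remove_duplicate_rectangles : Prop := ∀ (rectangles : List (List (List (Int × Int)))) (pixel_tolerance : Int), Dom_remove_duplicate_rectangles rectangles pixel_tolerance → Pre_remove_duplicate_rectangles rectangles pixel_tolerance → Spec_remove_duplicate_rectangles rectangles pixel_tolerance (remove_duplicate_rectangles rectangles pixel_tolerance)

-- ===== LEMMAS AND PROOFS =====

-- A's index loop over equal-length corner lists equals B's zip/all pass.
theorem go_eq_zip_all (tol : Int) : ∀ (c1 c2 : List (Int × Int)), c1.length = c2.length →
    are_rectangles_equal_go tol c1 c2 =
      (c1.zip c2).all (fun p => |p.1.1 - p.2.1| ≤ tol && |p.1.2 - p.2.2| ≤ tol) := by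
  intro c1
  induction c1 with
  | nil => intro c2 _; simp [are_rectangles_equal_go]
  | cons h t ih =>
      intro c2 hl
      cases c2 with
      | nil => simp at hl
      | cons h2 t2 =>
          obtain ⟨x1, y1⟩ := h
          obtain ⟨x2, y2⟩ := h2
          simp only [List.length_cons, Nat.succ.injEq] at hl
          by_cases hc : |x1 - x2| > tol ∨ |y1 - y2| > tol
          · rw [are_rectangles_equal_go]
            rw [if_pos (by simpa using hc)]
            rcases hc with hc | hc
            · have hx : ¬(|x1 - x2| ≤ tol) := by omega
              simp [hx]
            · have hy : ¬(|y1 - y2| ≤ tol) := by omega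
              simp [hy]
          · rw [are_rectangles_equal_go]
            rw [if_neg (by simpa using hc)]
            push_neg at hc
            simp [ih t2 hl, hc.1, hc.2]

-- A's rectangle comparison equals B's corner test.
theorem eq_close_lists (c1 c2 : List (Int × Int)) (tol : Int) :
    (if c1.length ≠ c2.length then false else are_rectangles_equal_go tol c1 c2) =
      corners_close c1 c2 tol := by
  by_cases h : c1.length = c2.length
  · rw [if_neg (by simp [h])]
    unfold corners_close
    rw [go_eq_zip_all tol _ _ h]
    simp [h]
  · rw [if_pos (by simp [h])]
    unfold corners_close
    simp [h]

theorem eq_eq_close (r1 r2 : List (List (Int × Int))) (tol : Int) :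
    are_rectangles_equal r1 r2 tol = corners_close (r1.headD []) (r2.headD []) tol :=
  eq_close_lists (r1.headD []) (r2.headD []) tol

-- A's accumulator loop, expressed through B's sieve.
theorem go_eq_sieve (tol : Int) : ∀ (xs acc : List (List (List (Int × Int)))),
    remove_duplicate_rectangles_go tol acc xs =
      acc ++ remove_duplicate_rectangles_alt
        (xs.filter (fun s => !acc.any (fun u => corners_close (s.headD []) (u.headD []) tol))) tol := by
  intro xs
  induction xs with
  | nil => intro acc; simp [remove_duplicate_rectangles_go, remove_duplicate_rectangles_alt]
  | cons r rs ih =>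
      intro acc
      by_cases hdup : acc.any (fun u => are_rectangles_equal r u tol) = true
      · have hdup' : acc.any (fun u => corners_close (r.headD []) (u.headD []) tol) = true := by
          simpa [eq_eq_close] using hdup
        simp only [remove_duplicate_rectangles_go, hdup, List.filter_cons,
          hdup', Bool.not_true]
        exact ih acc
      · have hdup' : acc.any (fun u => corners_close (r.headD []) (u.headD []) tol) = false := by
          rw [← Bool.not_eq_true]
          simpa [eq_eq_close] using hdup
        rw [remove_duplicate_rectangles_go]
        simp only [hdup]
        rw [ih (acc ++ [r])]
        have hfil : rs.filter (fun s => !(acc ++ [r]).any (fun u => corners_close (s.headD []) (u.headD []) tol))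
            = (rs.filter (fun s => !acc.any (fun u => corners_close (s.headD []) (u.headD []) tol))).filter
                (fun s => !corners_close (s.headD []) (r.headD []) tol) := by
          rw [List.filter_filter]
          apply List.filter_congr
          intro s _
          simp [List.any_append, Bool.and_comm]
        rw [hfil]
        simp only [List.filter_cons, hdup', Bool.not_false]
        conv_rhs => rw [remove_duplicate_rectangles_alt.eq_def]
        simp

-- ===== VERDICT (by name: the statement is the Claim_ definition above) =====
theorem remove_duplicate_rectangles_spec : Claim_equal_remove_duplicate_rectangles := by
  intro rectangles pixel_tolerance _ _
  unfold Spec_remove_duplicate_rectangles remove_duplicate_rectangles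
  rw [go_eq_sieve]
  simp
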